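-- pv_equiv track=rewrite | github.com/Ztrimus/leetcoding_OAs | Recursion/minchairs.py | minchair
-- ===== SOURCE A (Python) =====
-- def minchair(sim):
--     l = []
--     for i in range(len(sim)):
--         tot, avl = 0, 0
--         for k in sim[i]:
--             if k == 'C':
--                 if avl == 0:
--                     tot+=1
--                 else:
--                     avl-=1
--             if k == 'R':
--                 avl+=1
--             if k == 'U':
--                 if avl == 0:
--                     tot+=1
--                 else:
--                     avl-=1
--             if k == 'L':
--                 avl+=1
--         l.append(tot)
--     return l
-- ===== SOURCE B (Python) =====
-- def minchair(sim):
--     res = []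
--     for s in sim:
--         bal = 0
--         mx = 0
--         for k in s:
--             if k in 'CU':
--                 bal += 1
--             elif k in 'RL':
--                 bal -= 1
--             if bal > mx:
--                 mx = bal
--         res.append(mx)
--     return res
-- ===== Notes on version B (the rewrite author's own statement) =====
-- stated objective: simpler
-- what changed: Replaces A's two-counter availability simulation (tot/avl with if-avl==0 branching per character) by a single running prefix balance (+1 for C/U, -1 for R/L) whose running maximum is the answer.
import Mathlib
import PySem

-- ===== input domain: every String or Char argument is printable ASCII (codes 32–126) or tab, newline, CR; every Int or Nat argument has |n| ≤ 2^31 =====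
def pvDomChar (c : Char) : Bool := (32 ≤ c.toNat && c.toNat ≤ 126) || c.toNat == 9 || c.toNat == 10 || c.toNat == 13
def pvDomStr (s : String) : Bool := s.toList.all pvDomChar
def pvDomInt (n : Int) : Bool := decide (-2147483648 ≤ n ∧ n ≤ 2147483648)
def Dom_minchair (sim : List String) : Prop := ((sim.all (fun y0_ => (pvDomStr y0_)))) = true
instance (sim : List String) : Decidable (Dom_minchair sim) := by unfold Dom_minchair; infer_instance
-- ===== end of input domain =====

-- B is the simpler form: one running balance whose running maximum is the answer,
-- instead of A's two-counter availability simulation. Equivalence proved on all inputs.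

-- ===== PORT A =====
-- A's inner loop: four sequential ifs over the state (tot, avl)
def minchairStepA (st : Int × Int) (k : Char) : Int × Int :=
  let st1 := if k = 'C' then (if st.2 = 0 then (st.1 + 1, st.2) else (st.1, st.2 - 1)) else st
  let st2 := if k = 'R' then (st1.1, st1.2 + 1) else st1
  let st3 := if k = 'U' then (if st2.2 = 0 then (st2.1 + 1, st2.2) else (st2.1, st2.2 - 1)) else st2
  if k = 'L' then (st3.1, st3.2 + 1) else st3

def minchair (sim : List String) : List Int :=
  sim.map (fun s => (s.toList.foldl minchairStepA (0, 0)).1)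

-- ===== PORT B =====
-- B's inner loop: state (bal, mx)
def minchairStepB (st : Int × Int) (k : Char) : Int × Int :=
  let bal := if k = 'C' ∨ k = 'U' then st.1 + 1
             else if k = 'R' ∨ k = 'L' then st.1 - 1 else st.1
  (bal, if bal > st.2 then bal else st.2)

def minchair_alt (sim : List String) : List Int :=
  sim.map (fun s => (s.toList.foldl minchairStepB (0, 0)).2)

-- ===== PRECONDITION & SPEC =====
def Spec_minchair (sim : List String) (out : List Int) : Prop := out = minchair_alt sim
instance (sim : List String) (out : List Int) : Decidable (Spec_minchair sim out) := by unfold Spec_minchair; infer_instance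

-- ===== CLAIM (what is proved, stated in full; the proofs are below) =====
def Claim_equal_minchair : Prop := ∀ (sim : List String), Dom_minchair sim → Spec_minchair sim (minchair sim)

-- ===== LEMMAS AND PROOFS =====

-- one step preserves the coupling: A's state is (mx, mx - bal) for B's state (bal, mx), bal ≤ mx
theorem minchair_step_rel (k : Char) (bal mx : Int) (h : bal ≤ mx) :
    minchairStepA (mx, mx - bal) k
      = ((minchairStepB (bal, mx) k).2, (minchairStepB (bal, mx) k).2 - (minchairStepB (bal, mx) k).1)
    ∧ (minchairStepB (bal, mx) k).1 ≤ (minchairStepB (bal, mx) k).2 := by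
  simp only [minchairStepA, minchairStepB]
  by_cases hC : k = 'C' <;> by_cases hR : k = 'R' <;> by_cases hU : k = 'U' <;>
    by_cases hL : k = 'L' <;> simp_all <;> split_ifs <;> (try constructor) <;>
    first | rfl | omega | (apply Prod.ext <;> simp <;> omega)

theorem minchair_fold_rel (cs : List Char) :
    ∀ (bal mx : Int), bal ≤ mx →
      (cs.foldl minchairStepA (mx, mx - bal)).1 = (cs.foldl minchairStepB (bal, mx)).2 := by
  induction cs with
  | nil => intro bal mx h; simp
  | cons k cs ih =>
    intro bal mx h
    obtain ⟨heq, hle⟩ := minchair_step_rel k bal mx h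
    simp only [List.foldl_cons, heq]
    exact ih _ _ hle

-- ===== VERDICT (by name: the statement is the Claim_ definition above) =====
theorem minchair_spec : Claim_equal_minchair := by
  intro sim _
  unfold Spec_minchair minchair minchair_alt
  refine List.map_congr_left (fun s _ => ?_)
  have := minchair_fold_rel s.toList 0 0 le_rfl
  simpa using this
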